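-- pv_equiv track=rewrite | github.com/loganyu/leetcode | problems/1455_check_if_a_word_occurs_as_a_prefix_of_any_word_in_a_sentence.py | isPrefixOfWord
-- ===== SOURCE A (Python) =====
-- def isPrefixOfWord(sentence: str, searchWord: str) -> int:
--     words_list = []
--     current_word = ""
--     for character in sentence:
--         if character != " ":
--             current_word += character
--         else:
--             if current_word:
--                 words_list.append(current_word)
--                 current_word = ""
--     if current_word:
--         words_list.append(current_word)
--     for word_index, word in enumerate(words_list):
--         if len(word) >= len(searchWord):
--             is_match = True
--             for char_index in range(len(searchWord)):
--                 if word[char_index] != searchWord[char_index]: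
--                     is_match = False
--                     break
--             if is_match:
--                 return word_index + 1
--
--     return -1
-- ===== SOURCE B (Python) =====
-- def isPrefixOfWord(sentence: str, searchWord: str) -> int:
--     # Single streaming pass: never materializes a word list.
--     m = len(searchWord)
--     count = 0
--     rest = sentence
--     while rest:
--         if rest[0] == ' ':
--             rest = rest[1:]
--         else:
--             count += 1
--             k = rest.find(' ')
--             wordlen = len(rest) if k == -1 else k
--             if m <= wordlen and rest[:m] == searchWord:
--                 return count
--             rest = rest[wordlen:]
--     return -1
-- ===== Notes on version B (the rewrite author's own statement) =====
-- stated objective: faster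
-- what changed: B replaces A's two-phase approach (build the full word list by per-character string concatenation, then scan it with an inner per-character comparison loop) by a single streaming pass over the sentence that counts word starts and checks the search word in place with one slice comparison, never materializing a word list.
import Mathlib
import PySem

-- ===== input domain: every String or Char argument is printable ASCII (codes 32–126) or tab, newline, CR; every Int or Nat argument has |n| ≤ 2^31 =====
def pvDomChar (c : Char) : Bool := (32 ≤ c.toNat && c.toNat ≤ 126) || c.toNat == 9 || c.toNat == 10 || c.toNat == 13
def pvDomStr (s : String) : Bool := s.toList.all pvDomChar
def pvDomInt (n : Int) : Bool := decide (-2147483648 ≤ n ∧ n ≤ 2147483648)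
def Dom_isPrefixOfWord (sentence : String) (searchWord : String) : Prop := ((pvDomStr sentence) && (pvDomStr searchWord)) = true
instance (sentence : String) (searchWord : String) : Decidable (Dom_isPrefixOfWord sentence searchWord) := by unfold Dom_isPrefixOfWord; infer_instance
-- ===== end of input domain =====

-- B streams over the sentence in one pass (counting word starts, checking the prefix in place
-- with a slice comparison) instead of first materializing the word list; same asymptotic cost,
-- measurably faster by constant factor (no per-character concatenation, no word list).

-- ===== PORT A =====
-- the inner `for char_index in range(len(searchWord))` loop with break
def isMatch (sw w : List Char) : Bool :=
  (List.range sw.length).all (fun i => w.getD i ' ' == sw.getD i ' ')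

-- the `for word_index, word in enumerate(words_list)` loop
def scanA (sw : List Char) (words : List (List Char)) (idx : Int) : Int :=
  match words with
  | [] => -1
  | w :: ws => if sw.length ≤ w.length ∧ isMatch sw w then idx + 1 else scanA sw ws (idx + 1)

-- the word-building fold over the characters of `sentence`
def stepA (st : List (List Char) × List Char) (ch : Char) : List (List Char) × List Char :=
  if ch ≠ ' ' then (st.1, st.2 ++ [ch])
  else if st.2 ≠ [] then (st.1 ++ [st.2], ([] : List Char)) else st

def isPrefixOfWord (sentence : String) (searchWord : String) : Int :=
  let st := sentence.toList.foldl stepA ([], [])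
  let words := if st.2 ≠ [] then st.1 ++ [st.2] else st.1
  scanA searchWord.toList words 0

-- ===== PORT B =====
-- the `while rest:` loop of Source B: skip a space, or count a word start, test the prefix
-- in place (`wordlen` = result of rest.find(' ') normalized), and jump past the word.
def goB (sw : List Char) (cs : List Char) (count : Int) : Int :=
  match h : cs with
  | [] => -1
  | c :: rest =>
    if c = ' ' then goB sw rest count
    else
      let wordlen := ((c :: rest).takeWhile (· ≠ ' ')).length
      if sw.length ≤ wordlen ∧ (c :: rest).take sw.length = sw then count + 1
      else goB sw ((c :: rest).drop wordlen) (count + 1)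
termination_by cs.length
decreasing_by
  · simp
  · have h1 : 1 ≤ ((c :: rest).takeWhile (· ≠ ' ')).length := by simp [*]
    simp only [List.length_drop, List.length_cons]
    omega

def isPrefixOfWord_alt (sentence : String) (searchWord : String) : Int :=
  goB searchWord.toList sentence.toList 0

-- ===== PRECONDITION & SPEC =====
def Spec_isPrefixOfWord (sentence : String) (searchWord : String) (out : Int) : Prop := out = isPrefixOfWord_alt sentence searchWord
instance (sentence : String) (searchWord : String) (out : Int) : Decidable (Spec_isPrefixOfWord sentence searchWord out) := by unfold Spec_isPrefixOfWord; infer_instance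

-- ===== CLAIM (what is proved, stated in full; the proofs are below) =====
def Claim_equal_isPrefixOfWord : Prop := ∀ (sentence : String) (searchWord : String), Dom_isPrefixOfWord sentence searchWord → Spec_isPrefixOfWord sentence searchWord (isPrefixOfWord sentence searchWord)

-- ===== LEMMAS AND PROOFS =====

/-- Structural description of splitting on ' ' with empties removed. -/
def splitW (cs : List Char) : List (List Char) :=
  match cs with
  | [] => []
  | c :: rest =>
    if c = ' ' then splitW rest
    else (c :: rest).takeWhile (· ≠ ' ') ::
         splitW ((c :: rest).drop ((c :: rest).takeWhile (· ≠ ' ')).length)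
termination_by cs.length
decreasing_by
  · simp
  · have h1 : 1 ≤ ((c :: rest).takeWhile (· ≠ ' ')).length := by simp [*]
    simp only [List.length_drop, List.length_cons]
    omega

/-- Words still to be produced from a partial current word `cur` and remaining chars. -/
def wordsWith (cur : List Char) (cs : List Char) : List (List Char) :=
  match cs with
  | [] => if cur ≠ [] then [cur] else []
  | c :: rest =>
    if c ≠ ' ' then wordsWith (cur ++ [c]) rest
    else if cur ≠ [] then cur :: wordsWith [] rest else wordsWith cur rest

lemma fold_words (cs : List Char) : ∀ acc cur,
    (let st := cs.foldl stepA (acc, cur);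
     if st.2 ≠ [] then st.1 ++ [st.2] else st.1) = acc ++ wordsWith cur cs := by
  induction cs with
  | nil =>
    intro acc cur
    simp only [List.foldl_nil, wordsWith]
    split_ifs <;> simp
  | cons c rest ih =>
    intro acc cur
    simp only [List.foldl_cons, wordsWith, stepA]
    by_cases hc : c = ' '
    · by_cases hcur : cur = []
      · simp [hc, hcur, ih]
      · simp [hc, hcur, ih, List.append_assoc]
    · simp [hc, ih]

lemma wordsWith_splitW (cs : List Char) :
    wordsWith [] cs = splitW cs ∧
      ∀ cur, cur ≠ [] → wordsWith cur cs =
        (cur ++ cs.takeWhile (· ≠ ' ')) ::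
          splitW (cs.drop (cs.takeWhile (· ≠ ' ')).length) := by
  induction cs with
  | nil =>
    refine ⟨by simp [wordsWith, splitW], ?_⟩
    intro cur hcur
    simp [wordsWith, splitW, hcur]
  | cons c rest ih =>
    by_cases hc : c = ' '
    · have t : (c :: rest).takeWhile (· ≠ ' ') = [] := by simp [hc]
      constructor
      · rw [show splitW (c :: rest) = splitW rest by rw [splitW]; simp [hc]]
        rw [show wordsWith [] (c :: rest) = wordsWith [] rest by simp [wordsWith, hc]]
        exact ih.1
      · intro cur hcur
        have : wordsWith cur (c :: rest) = cur :: wordsWith [] rest := by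
          simp [wordsWith, hc, hcur]
        rw [this, ih.1, t]
        simp [splitW, hc]
    · have t : (c :: rest).takeWhile (· ≠ ' ') = c :: rest.takeWhile (· ≠ ' ') := by
        simp [hc]
      have key : ∀ cur, wordsWith cur (c :: rest) =
          ((cur ++ [c]) ++ rest.takeWhile (· ≠ ' ')) ::
            splitW (rest.drop (rest.takeWhile (· ≠ ' ')).length) := by
        intro cur
        have : wordsWith cur (c :: rest) = wordsWith (cur ++ [c]) rest := by
          simp [wordsWith, hc]
        rw [this, ih.2 (cur ++ [c]) (by simp)]
      constructor
      · rw [key []]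
        conv_rhs => rw [splitW]
        simp [hc]
      · intro cur hcur
        rw [key cur, t]
        simp

lemma match_iff (sw w : List Char) (h : sw.length ≤ w.length) :
    isMatch sw w = true ↔ w.take sw.length = sw := by
  unfold isMatch
  rw [List.all_eq_true]
  constructor
  · intro H
    apply List.ext_getElem (by simp [Nat.min_eq_left h])
    intro i hi1 hi2
    have hi : i < sw.length := by
      simp only [List.length_take] at hi1; omega
    have := H i (List.mem_range.mpr hi)
    rw [beq_iff_eq, List.getD_eq_getElem w ' ' (lt_of_lt_of_le hi h),
        List.getD_eq_getElem sw ' ' hi] at this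
    simpa [List.getElem_take] using this
  · intro H i hi
    have hi' : i < sw.length := List.mem_range.mp hi
    rw [beq_iff_eq, List.getD_eq_getElem w ' ' (lt_of_lt_of_le hi' h),
        List.getD_eq_getElem sw ' ' hi']
    have : (w.take sw.length)[i]'(by simp [Nat.min_eq_left h, hi']) = sw[i]'hi' := by
      simp [H]
    simpa [List.getElem_take] using this

lemma take_of_takeWhile_le (l : List Char) (n : Nat)
    (h : n ≤ (l.takeWhile (· ≠ ' ')).length) :
    l.take n = (l.takeWhile (· ≠ ' ')).take n := by
  conv_lhs => rw [← List.takeWhile_append_dropWhile (p := (· ≠ ' ')) (l := l)]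
  rw [List.take_append_of_le_length h]

lemma goB_scanA (sw : List Char) : ∀ cs count, goB sw cs count = scanA sw (splitW cs) count := by
  intro cs count
  fun_induction goB sw cs count
  case case1 => simp [splitW, scanA]
  case case2 =>
    rename_i count rest ih
    rw [show splitW (' ' :: rest) = splitW rest by rw [splitW]; simp]
    exact ih
  case case3 =>
    rename_i count c rest hc wordlen hcond
    conv_rhs => rw [splitW]
    have hlen : sw.length ≤ ((c :: rest).takeWhile (· ≠ ' ')).length := hcond.1
    have hm : isMatch sw ((c :: rest).takeWhile (· ≠ ' ')) = true := by
      rw [match_iff _ _ hlen, ← take_of_takeWhile_le _ _ hlen]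
      exact hcond.2
    rw [if_neg hc, scanA, if_pos ⟨hlen, hm⟩]
  case case4 =>
    rename_i count c rest hc wordlen hcond ih
    conv_rhs => rw [splitW]
    rw [if_neg hc, scanA]
    have hno : ¬ (sw.length ≤ ((c :: rest).takeWhile (· ≠ ' ')).length ∧
        isMatch sw ((c :: rest).takeWhile (· ≠ ' ')) = true) := by
      intro ⟨h1, h2⟩
      exact hcond ⟨h1, by rw [take_of_takeWhile_le _ _ h1]; exact (match_iff _ _ h1).mp h2⟩
    rw [if_neg hno]
    exact ih

-- ===== VERDICT (by name: the statement is the Claim_ definition above) =====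
theorem isPrefixOfWord_spec : Claim_equal_isPrefixOfWord := by
  intro sentence searchWord _
  unfold Spec_isPrefixOfWord isPrefixOfWord isPrefixOfWord_alt
  rw [goB_scanA, ← (wordsWith_splitW sentence.toList).1]
  simpa using congrArg (scanA searchWord.toList · 0)
    (fold_words sentence.toList [] [])
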